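-- pv_equiv track=rewrite | github.com/Querri-inc/querri-python-sdk | querri/cli/_image.py | _nearest_palette_index
-- ===== SOURCE A (Python) =====
-- _PALETTE = [0, 95, 135, 175, 215, 255]
--
-- def _nearest_palette_index(value: int) -> int:
--     """Find the nearest index in the 6-level palette for a single channel."""
--     best = 0
--     best_dist = abs(value - _PALETTE[0])
--     for i in range(1, 6):
--         dist = abs(value - _PALETTE[i])
--         if dist < best_dist:
--             best_dist = dist
--             best = i
--     return best
-- ===== SOURCE B (Python) =====
-- import bisect
--
-- _PALETTE = [0, 95, 135, 175, 215, 255]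
--
-- # Doubled midpoints between consecutive palette entries (2*47.5, 2*115, ...),
-- # kept as integers to avoid floats; compare against 2*value.
-- _BOUNDS2 = [95, 230, 310, 390, 470]
--
-- def _nearest_palette_index(value: int) -> int:
--     """Find the nearest index in the 6-level palette for a single channel."""
--     return bisect.bisect_left(_BOUNDS2, 2 * value)
-- ===== Notes on version B (the rewrite author's own statement) =====
-- stated objective: simpler
-- what changed: Replaced the distance-tracking linear scan over the palette by a single bisect_left over the five precomputed (doubled, integer) midpoints between consecutive palette entries; bisect_left with doubled bounds reproduces A's strict-< tie-breaking exactly.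
import Mathlib
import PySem

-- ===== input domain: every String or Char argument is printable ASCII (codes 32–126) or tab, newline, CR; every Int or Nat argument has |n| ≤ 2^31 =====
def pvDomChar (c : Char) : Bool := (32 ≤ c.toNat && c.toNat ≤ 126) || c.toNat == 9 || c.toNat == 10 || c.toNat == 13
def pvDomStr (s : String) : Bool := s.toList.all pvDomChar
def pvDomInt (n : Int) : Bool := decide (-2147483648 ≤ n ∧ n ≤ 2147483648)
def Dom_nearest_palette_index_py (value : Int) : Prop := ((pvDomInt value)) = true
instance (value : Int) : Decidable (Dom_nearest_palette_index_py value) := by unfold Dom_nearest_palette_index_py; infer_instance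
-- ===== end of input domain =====

-- B replaces A's distance-tracking linear scan by a bisect_left over precomputed doubled midpoints (simpler).


-- ===== PORT A =====
def pvPalette : List Int := [0, 95, 135, 175, 215, 255]

-- Python abs on int
def pyAbs (x : Int) : Int := (x.natAbs : Int)

-- literal transliteration: best/best_dist accumulator over range(1,6)
def nearest_palette_index_py (value : Int) : Int :=
  (((PySem.List.pyRange 1 6 1).foldl
      (fun (st : Int × Int) (i : Int) =>
        let dist := pyAbs (value - (PySem.List.pyGetD pvPalette i 0))
        if dist < st.2 then (i, dist) else st)
      (0, pyAbs (value - (PySem.List.pyGetD pvPalette 0 0))))).1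

-- ===== PORT B =====
def pvBounds2 : List Int := [95, 230, 310, 390, 470]

-- bisect.bisect_left on a sorted list = number of elements strictly below the key
def nearest_palette_index_py_alt (value : Int) : Int :=
  ((pvBounds2.countP (fun b => decide (b < 2 * value)) : Nat) : Int)

-- ===== PRECONDITION & SPEC =====
def Spec_nearest_palette_index_py (value : Int) (out : Int) : Prop := out = nearest_palette_index_py_alt value
instance (value : Int) (out : Int) : Decidable (Spec_nearest_palette_index_py value out) := by unfold Spec_nearest_palette_index_py; infer_instance

-- ===== CLAIM (what is proved, stated in full; the proofs are below) =====
def Claim_equal_nearest_palette_index_py : Prop := ∀ (value : Int), Dom_nearest_palette_index_py value → Spec_nearest_palette_index_py value (nearest_palette_index_py value)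

-- ===== LEMMAS AND PROOFS =====

-- ===== VERDICT (by name: the statement is the Claim_ definition above) =====
-- proof-only normal form: both ports equal this threshold chain
def pvThresh (v : Int) : Int :=
  if 2 * v ≤ 95 then 0 else if 2 * v ≤ 230 then 1 else if 2 * v ≤ 310 then 2
  else if 2 * v ≤ 390 then 3 else if 2 * v ≤ 470 then 4 else 5

theorem pv_a_eq_thresh (v : Int) : nearest_palette_index_py v = pvThresh v := by
  unfold nearest_palette_index_py pvThresh
  simp only [show PySem.List.pyRange 1 6 1 = [1, 2, 3, 4, 5] from by decide, List.foldl,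
    show PySem.List.pyGetD pvPalette 0 0 = 0 from by decide,
    show PySem.List.pyGetD pvPalette 1 0 = 95 from by decide,
    show PySem.List.pyGetD pvPalette 2 0 = 135 from by decide,
    show PySem.List.pyGetD pvPalette 3 0 = 175 from by decide,
    show PySem.List.pyGetD pvPalette 4 0 = 215 from by decide,
    show PySem.List.pyGetD pvPalette 5 0 = 255 from by decide, pyAbs]
  split_ifs <;> omega

theorem pv_alt_eq_thresh (v : Int) : nearest_palette_index_py_alt v = pvThresh v := by
  unfold nearest_palette_index_py_alt pvThresh pvBounds2
  simp only [List.countP, List.countP.go, Bool.cond_eq_ite, decide_eq_true_eq]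
  split_ifs <;> omega

theorem nearest_palette_index_py_spec : Claim_equal_nearest_palette_index_py := by
  intro value _
  unfold Spec_nearest_palette_index_py
  rw [pv_a_eq_thresh, pv_alt_eq_thresh]
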